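-- pv_equiv track=rewrite | github.com/CodCodingCode/princeton | backend/src/neoantigen/chat/agent.py | _needs_rag
-- ===== SOURCE A (Python) =====
-- def _needs_rag(question: str) -> bool:
--     # Pre-fetch literature if the question smells like one that would benefit
--     # from evidence beyond what's already in the slimmed case context. Cast a
--     # wider net than before so phrases like "what does the data say about X"
--     # or "is there a trial proving Y works" auto-retrieve PubMed hits and the
--     # model doesn't have to text-call pubmed_search to get them.
--     triggers = [
--         "paper", "literature", "evidence", "study", "studies", "cite", "pmid",
--         "publish", "recent", "review", "data", "trial showed", "efficacy",
--         "response rate", "hazard ratio", "survival", "outcome", "prove",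
--         "proven", "clinical trial", "phase 2", "phase 3", "meta-analysis",
--         "cohort", "biomarker", "mechanism",
--     ]
--     q = question.lower()
--     return any(t in q for t in triggers)
-- ===== SOURCE B (Python) =====
-- _TRIGGERS = (
--     "paper;literature;evidence;study;studies;cite;pmid;publish;recent;review;data;trial showed;efficacy;response rate;hazard ratio;survival;outcome;prove;proven;clinical trial;phase 2;phase 3;meta-analysis;cohort;biomarker;mechanism"
-- ).split(";")
--
-- # Index the trigger tails once by their first character; scanning the question
-- # then only consults the handful of tails filed under the current character.
-- _INDEX = {}
-- for _t in _TRIGGERS: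
--     _INDEX.setdefault(_t[0], []).append(_t[1:])
--
--
-- def _needs_rag(question: str) -> bool:
--     q = question.lower()
--     for i, c in enumerate(q):
--         for tail in _INDEX.get(c, ()):
--             if q.startswith(tail, i + 1):
--                 return True
--     return False
-- ===== Notes on version B (the rewrite author's own statement) =====
-- stated objective: alternative
-- what changed: Instead of 26 independent substring-membership passes (any(t in q)), B builds a dict indexing trigger tails by their first character once at module load, then makes one positional scan of the lowercased question, at each position checking only the tails filed under the current character.
import Mathlib
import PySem

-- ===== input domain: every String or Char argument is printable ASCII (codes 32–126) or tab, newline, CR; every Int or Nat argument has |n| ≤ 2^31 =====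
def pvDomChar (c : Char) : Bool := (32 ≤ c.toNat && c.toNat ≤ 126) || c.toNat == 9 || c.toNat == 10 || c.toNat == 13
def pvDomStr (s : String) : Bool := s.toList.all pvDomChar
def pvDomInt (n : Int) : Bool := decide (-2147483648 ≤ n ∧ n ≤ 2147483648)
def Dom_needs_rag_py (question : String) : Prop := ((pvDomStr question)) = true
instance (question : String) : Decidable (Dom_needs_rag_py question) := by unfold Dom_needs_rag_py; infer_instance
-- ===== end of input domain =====

-- B indexes the triggers by first character once, then scans the question position
-- by position consulting only the tails filed under the current character
-- (alternative decomposition: dict-indexed positional scan vs 26 substring passes).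


-- ===== PORT A =====
def triggersA : List String :=
  ["paper", "literature", "evidence", "study", "studies", "cite", "pmid",
   "publish", "recent", "review", "data", "trial showed", "efficacy",
   "response rate", "hazard ratio", "survival", "outcome", "prove",
   "proven", "clinical trial", "phase 2", "phase 3", "meta-analysis",
   "cohort", "biomarker", "mechanism"]

def needs_rag_py (question : String) : Bool :=
  let q := PySem.Str.lower question
  triggersA.any (fun t => PySem.Str.isIn t q)

-- ===== PORT B =====
-- sep ";" is nonempty, so Python's split(";") always returns; split? is some there
def triggersB : List String :=
  (PySem.Str.split?
    "paper;literature;evidence;study;studies;cite;pmid;publish;recent;review;data;trial showed;efficacy;response rate;hazard ratio;survival;outcome;prove;proven;clinical trial;phase 2;phase 3;meta-analysis;cohort;biomarker;mechanism"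
    ";").getD []

-- module-level loop: _INDEX.setdefault(t[0], []).append(t[1:])
def indexB : PySem.Dict Char (List String) :=
  triggersB.foldl
    (fun d t => d.modify (t.toList.headD ' ') [] (· ++ [String.ofList (t.toList.drop 1)]))
    PySem.Dict.empty

-- q.startswith(tail, i+1) is exact here: 0 ≤ i+1 ≤ len(q), so it is
-- "tail is a prefix of q[i+1:]".
def scanB : List Char → Bool
  | [] => false
  | c :: rest =>
    ((indexB.getD c []).any fun tl => tl.toList.isPrefixOf rest) || scanB rest

def needs_rag_py_alt (question : String) : Bool :=
  let q := PySem.Str.lower question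
  scanB q.toList

-- ===== PRECONDITION & SPEC =====
def Spec_needs_rag_py (question : String) (out : Bool) : Prop := out = needs_rag_py_alt question
instance (question : String) (out : Bool) : Decidable (Spec_needs_rag_py question out) := by unfold Spec_needs_rag_py; infer_instance

-- ===== CLAIM (what is proved, stated in full; the proofs are below) =====
def Claim_equal_needs_rag_py : Prop := ∀ (question : String), Dom_needs_rag_py question → Spec_needs_rag_py question (needs_rag_py question)

-- ===== LEMMAS AND PROOFS =====

set_option maxRecDepth 8000 in
theorem triggersB_eq : triggersB = triggersA := by decide

theorem triggersB_nonempty : ∀ t ∈ triggersB, t.toList ≠ [] := by rw [triggersB_eq]; decide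

theorem point_eq (t : String) (ht : t.toList ≠ []) (c : Char) (rest : List Char) :
    ((t.toList.headD ' ') == c && (String.ofList (t.toList.drop 1)).toList.isPrefixOf rest)
      = t.toList.isPrefixOf (c :: rest) := by
  cases htl : t.toList with
  | nil => exact absurd htl ht
  | cons a as => simp [List.isPrefixOf, String.toList_ofList]

-- the first-character index answers exactly "some trigger is a prefix of c::rest"
theorem lookup_eq_any_prefix (c : Char) (rest : List Char) :
    ((indexB.getD c []).any fun tl => tl.toList.isPrefixOf rest)
      = triggersB.any (fun t => t.toList.isPrefixOf (c :: rest)) := by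
  have hfold :
      indexB =
        (triggersB.map (fun t => (t.toList.headD ' ', String.ofList (t.toList.drop 1)))).foldl
          (fun d p => d.modify p.1 [] (· ++ [p.2])) PySem.Dict.empty := by
    rw [List.foldl_map]; rfl
  rw [hfold, PySem.Dict.getD_foldl_modify_append, PySem.Dict.getD_empty, List.nil_append,
    List.any_map, List.any_filter, List.any_map, Bool.eq_iff_iff]
  simp only [List.any_eq_true, Function.comp_apply]
  constructor
  · rintro ⟨t, ht, hp⟩
    refine ⟨t, ht, ?_⟩
    rw [← point_eq t (triggersB_nonempty t ht) c rest]
    simpa using hp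
  · rintro ⟨t, ht, hp⟩
    refine ⟨t, ht, ?_⟩
    have h2 : ((t.toList.headD ' ') == c && (String.ofList (t.toList.drop 1)).toList.isPrefixOf rest) = true := by
      rw [point_eq t (triggersB_nonempty t ht) c rest]; exact hp
    simpa using h2
theorem scanB_iff (cs : List Char) :
    scanB cs = true ↔ ∃ t ∈ triggersB, ∃ j, t.toList <+: cs.drop j := by
  induction cs with
  | nil =>
    simp only [scanB, List.drop_nil]
    constructor
    · intro h; exact absurd h (by decide)
    · rintro ⟨t, ht, j, hp⟩
      exact absurd (List.prefix_nil.mp hp) (triggersB_nonempty t ht)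
  | cons c rest ih =>
    simp only [scanB, lookup_eq_any_prefix, Bool.or_eq_true, List.any_eq_true, ih]
    constructor
    · rintro (⟨t, ht, hp⟩ | ⟨t, ht, j, hp⟩)
      · exact ⟨t, ht, 0, by simpa using List.isPrefixOf_iff_prefix.mp hp⟩
      · exact ⟨t, ht, j + 1, by simpa using hp⟩
    · rintro ⟨t, ht, j, hp⟩
      cases j with
      | zero => exact Or.inl ⟨t, ht, List.isPrefixOf_iff_prefix.mpr (by simpa using hp)⟩
      | succ j => exact Or.inr ⟨t, ht, j, by simpa using hp⟩

theorem both_iff (q : String) : needs_rag_py q = true ↔ needs_rag_py_alt q = true := by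
  show (triggersA.any fun t => PySem.Str.isIn t (PySem.Str.lower q)) = true
    ↔ scanB (PySem.Str.lower q).toList = true
  rw [scanB_iff, triggersB_eq, List.any_eq_true]
  constructor
  · rintro ⟨t, ht, hin⟩
    rw [PySem.Str.isIn_iff_infix] at hin
    obtain ⟨j, hp⟩ := (PySem.Chars.exists_prefix_drop_iff_isIn _ _).mpr
      ((PySem.Chars.isIn_iff_infix _ _).mpr hin)
    exact ⟨t, ht, j, hp⟩
  · rintro ⟨t, ht, j, hp⟩
    refine ⟨t, ht, ?_⟩
    rw [PySem.Str.isIn_iff_infix]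
    exact (PySem.Chars.isIn_iff_infix _ _).mp
      ((PySem.Chars.exists_prefix_drop_iff_isIn _ _).mp ⟨j, hp⟩)

-- ===== VERDICT (by name: the statement is the Claim_ definition above) =====
theorem needs_rag_py_spec : Claim_equal_needs_rag_py := by
  intro q _
  show needs_rag_py q = needs_rag_py_alt q
  have h := both_iff q
  cases ha : needs_rag_py q <;> cases hb : needs_rag_py_alt q <;> simp_all
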